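-- pv_equiv track=rewrite | github.com/rmluck/CodePath_Intermediate-Technical-Interview-Prep | Problem Sets/problem_set_2.2.py | organize_exhibition
-- ===== SOURCE A (Python) =====
-- def organize_exhibition(collection: list[str]) -> list[list[str]]:
--     """
--     You are tasked with organizing a collection of art prints represented by a list of strings collection. You need to display these prints on a single wall in a 2D array format that meets the following criteria:
--     1. The 2D array should contain only the elements of the array collection.
--     2. Each row in the 2D array should contain distinct strings.
--     3. The number of rows in the 2D array should be minimal.
--     Return the resulting array. If there are multiple answers, return any of them. Note that the 2D array can have a different number of elements on each row.
--
--     Parameters: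
--         collection (list[str]): collection of art prints
--
--     Returns:
--         list[list[str]]: 2D array of art prints on single wall
--     """
--
--     count = {}
--     for print in collection:
--         if print in count:
--             count[print] += 1
--         else:
--             count[print] = 1
--
--     wall = []
--     for i in range(1, max(count.values()) + 1):
--         row = []
--         for print in count.keys():
--             if count[print] >= i:
--                 row.append(print)
--         wall.append(row)
--
--     return wall
-- ===== SOURCE B (Python) =====
-- def organize_exhibition(collection: list[str]) -> list[list[str]]:
--     count = {}
--     for p in collection:
--         count[p] = count.get(p, 0) + 1
--     rows = []
--     for p, c in count.items():
--         if c > len(rows):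
--             rows = rows + [[] for _ in range(c - len(rows))]
--         rows = [row + [p] if j < c else row for j, row in enumerate(rows)]
--     return rows
-- ===== Notes on version B (the rewrite author's own statement) =====
-- stated objective: alternative
-- what changed: Instead of scanning all distinct prints once per row (max_count passes filtering keys by count >= i), B makes a single pass over the counter's items, padding the row list and placing each print into rows 0..count-1 at once.
import Mathlib
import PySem

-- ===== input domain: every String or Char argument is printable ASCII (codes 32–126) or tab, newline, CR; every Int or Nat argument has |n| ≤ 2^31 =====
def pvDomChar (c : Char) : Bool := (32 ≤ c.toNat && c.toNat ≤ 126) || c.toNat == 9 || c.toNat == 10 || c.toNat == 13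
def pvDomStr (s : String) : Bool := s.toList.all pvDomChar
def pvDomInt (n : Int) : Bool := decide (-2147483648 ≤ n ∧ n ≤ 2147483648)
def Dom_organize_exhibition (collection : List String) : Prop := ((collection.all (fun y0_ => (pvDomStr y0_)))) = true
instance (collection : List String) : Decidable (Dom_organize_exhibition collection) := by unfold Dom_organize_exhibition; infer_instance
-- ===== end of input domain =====

-- B replaces A's row-by-row scanning of all distinct prints with a single pass over the
-- counter's items that puts each print into rows 0..count-1 (objective: alternative).

-- ===== PORT A =====
def organize_exhibition (collection : List String) : List (List String) :=
  let count := collection.foldl (fun d p =>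
      if d.contains p then d.modify p 0 (· + 1) else d.insert p 1) PySem.Dict.empty
  let m := ((PySem.List.max? count.values (fun v => v)).getD 0)
  (PySem.List.pyRange 1 (m + 1) 1).foldl (fun wall i =>
      wall ++ [count.keys.foldl (fun row p => if count.getD p 0 ≥ i then row ++ [p] else row) []]) []

-- ===== PORT B =====
def organize_exhibition_alt (collection : List String) : List (List String) :=
  let count := collection.foldl (fun d p => d.insert p (d.getD p 0 + 1)) PySem.Dict.empty
  count.items.foldl (fun rows pc =>
    let rows := if pc.2 > (rows.length : Int) then
        rows ++ List.replicate (pc.2 - (rows.length : Int)).toNat [] else rows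
    rows.zipIdx.map (fun rj => if (rj.2 : Int) < pc.2 then rj.1 ++ [pc.1] else rj.1)) []

-- ===== PRECONDITION & SPEC =====
-- Pre_ excludes only the empty collection, on which A's max(count.values()) raises ValueError.
def Pre_organize_exhibition (collection : List String) : Prop := collection ≠ []
instance (collection : List String) : Decidable (Pre_organize_exhibition collection) := by
  unfold Pre_organize_exhibition; infer_instance
def pvWitness_organize_exhibition : List String := ["a", "b", "a"]

def Spec_organize_exhibition (collection : List String) (out : List (List String)) : Prop :=
  out = organize_exhibition_alt collection
instance (collection : List String) (out : List (List String)) : Decidable (Spec_organize_exhibition collection out) := by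
  unfold Spec_organize_exhibition; infer_instance

-- ===== CLAIM (what is proved, stated in full; the proofs are below) =====
def Claim_equal_organize_exhibition : Prop := ∀ (collection : List String), Dom_organize_exhibition collection → Pre_organize_exhibition collection → Spec_organize_exhibition collection (organize_exhibition collection)

-- ===== LEMMAS AND PROOFS =====

-- A's counter-building step is Python's `d[p] = d.get(p, 0) + 1` written with a membership test.
lemma stepA_eq_modify (d : PySem.Dict String Int) (p : String) :
    (if d.contains p then d.modify p 0 (· + 1) else d.insert p 1) = d.modify p 0 (· + 1) := by
  by_cases h : d.contains p
  · simp [h]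
  · simp only [Bool.not_eq_true] at h
    simp [PySem.Dict.insert, PySem.Dict.modify, h, PySem.Dict.getD_of_not_contains _ _ h]

lemma countA_eq_counter (xs : List String) :
    xs.foldl (fun d p => if d.contains p then d.modify p 0 (· + 1) else d.insert p 1)
      PySem.Dict.empty = PySem.Dict.counter xs := by
  rw [PySem.Dict.counter_eq_foldl]
  congr 1
  funext d p
  exact stepA_eq_modify d p

-- the number of rows B maintains after processing l
def maxcN (l : List (String × Int)) : Nat := l.foldl (fun m kv => max m kv.2.toNat) 0

-- canonical form of B's row list after processing l
def rowsOf (l : List (String × Int)) : List (List String) :=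
  (List.range (maxcN l)).map (fun (j : Nat) => (l.filter (fun kv => (j : Int) < kv.2)).map Prod.fst)

lemma le_foldl_max_nat (l : List (String × Int)) (a : Nat) :
    a ≤ l.foldl (fun m kv => max m kv.2.toNat) a := by
  induction l generalizing a with
  | nil => simp
  | cons kv t ih => exact le_trans (le_max_left a kv.2.toNat) (ih _)

lemma filter_eq_nil_of_maxc_le (l : List (String × Int)) (a j : Nat)
    (h : l.foldl (fun m kv => max m kv.2.toNat) a ≤ j) :
    l.filter (fun kv => (j : Int) < kv.2) = [] := by
  induction l generalizing a with
  | nil => rfl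
  | cons kv t ih =>
    simp only [List.foldl_cons] at h
    have hkv : kv.2.toNat ≤ j :=
      le_trans (le_trans (le_max_right a kv.2.toNat) (le_foldl_max_nat t _)) h
    have : ¬ ((j : Int) < kv.2) := by omega
    simp only [List.filter_cons, this, decide_false, Bool.false_eq_true, if_false]
    exact ih _ h

lemma maxcN_append (l : List (String × Int)) (p : String) (c : Int) :
    maxcN (l ++ [(p, c)]) = max (maxcN l) c.toNat := by
  simp [maxcN, List.foldl_append]

lemma length_rowsOf (l : List (String × Int)) : (rowsOf l).length = maxcN l := by
  simp [rowsOf]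

lemma getElem_rowsOf (l : List (String × Int)) (j : Nat) (h : j < (rowsOf l).length) :
    (rowsOf l)[j] = (l.filter (fun kv => (j : Int) < kv.2)).map Prod.fst := by
  unfold rowsOf
  rw [List.getElem_map, List.getElem_range]

-- one step of B's loop preserves the canonical row-list form
lemma stepB_rowsOf (l : List (String × Int)) (p : String) (c : Int) :
    (let rows := if c > ((rowsOf l).length : Int) then
        rowsOf l ++ List.replicate (c - ((rowsOf l).length : Int)).toNat [] else rowsOf l
     rows.zipIdx.map (fun rj => if (rj.2 : Int) < c then rj.1 ++ [p] else rj.1))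
      = rowsOf (l ++ [(p, c)]) := by
  simp only [length_rowsOf]
  by_cases hc : c > (maxcN l : Int)
  · simp only [hc, if_true]
    apply List.ext_getElem
    · simp [rowsOf, maxcN_append]
      omega
    · intro j h1 h2
      simp only [List.getElem_map, List.getElem_zipIdx, Nat.zero_add]
      have hj : j < c.toNat := by
        simp only [List.length_map, List.length_zipIdx, List.length_append,
          length_rowsOf, List.length_replicate] at h1
        omega
      have hjc : (j : Int) < c := by omega
      rw [getElem_rowsOf]
      simp only [hjc, if_true, List.filter_append, List.map_append]
      have : ([((p, c))].filter (fun kv => (j : Int) < kv.2)).map Prod.fst = [p] := by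
        simp [hjc]
      rw [this]
      congr 1
      rw [List.getElem_append]
      split
      · rw [getElem_rowsOf]
      · next h' =>
        rw [List.getElem_replicate]
        rw [filter_eq_nil_of_maxc_le l 0 j (by rw [length_rowsOf] at h'; show maxcN l ≤ j; omega)]
        simp
  · simp only [hc, if_false]
    apply List.ext_getElem
    · simp [rowsOf, maxcN_append]
      omega
    · intro j h1 h2
      simp only [List.getElem_map, List.getElem_zipIdx, Nat.zero_add]
      rw [getElem_rowsOf, getElem_rowsOf]
      simp only [List.filter_append, List.map_append]
      by_cases hjc : (j : Int) < c
      · simp [hjc]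
      · simp [hjc]

-- B's whole loop computes the canonical row list
lemma B_loop_eq_rowsOf (l : List (String × Int)) :
    l.foldl (fun rows pc =>
      let rows := if pc.2 > (rows.length : Int) then
          rows ++ List.replicate (pc.2 - (rows.length : Int)).toNat [] else rows
      rows.zipIdx.map (fun rj => if (rj.2 : Int) < pc.2 then rj.1 ++ [pc.1] else rj.1)) []
      = rowsOf l := by
  induction l using List.reverseRecOn with
  | nil => rfl
  | append_singleton l kv ih =>
    rw [List.foldl_append, List.foldl_cons, List.foldl_nil, ih]
    exact stepB_rowsOf l kv.1 kv.2

lemma toNat_foldl_max (t : List Int) (a : Int) :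
    (t.foldl max a).toNat = t.foldl (fun m v => max m v.toNat) a.toNat := by
  induction t generalizing a with
  | nil => rfl
  | cons v t ih =>
    simp only [List.foldl_cons, ih]
    congr 1
    omega

-- A's row count max(count.values()) is B's final number of rows
lemma maxc_link (xs : List String) (h : xs ≠ []) :
    ((PySem.List.max? ((PySem.Set.ofList xs).map (fun k => (xs.count k : Int))) (fun v => v)).getD 0).toNat
    = (PySem.Set.ofList xs).foldl (fun m k => max m (xs.count k : Int).toNat) 0 := by
  have hne : PySem.Set.ofList xs ≠ [] := by
    cases xs with
    | nil => exact absurd rfl h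
    | cons x t =>
      intro hnil
      have := (PySem.Set.mem_ofList (x :: t) x).mpr (by simp)
      rw [hnil] at this; exact absurd this (List.not_mem_nil)
  obtain ⟨k0, kt, hks⟩ := List.exists_cons_of_ne_nil hne
  rw [hks]
  simp only [List.map_cons, PySem.List.max?_id_cons, Option.getD_some, List.foldl_cons, Nat.zero_max]
  rw [toNat_foldl_max, List.foldl_map]

-- the common canonical wall: row j holds the distinct prints occurring more than j times
def wallForm (xs : List String) : List (List String) :=
  (List.range ((PySem.Set.ofList xs).foldl (fun m k => max m (xs.count k : Int).toNat) 0)).map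
    (fun (j : Nat) => (PySem.Set.ofList xs).filter (fun p => decide ((j : Int) < (xs.count p : Int))))

lemma A_eq_wallForm (xs : List String) (h : xs ≠ []) :
    organize_exhibition xs = wallForm xs := by
  unfold organize_exhibition
  rw [countA_eq_counter]
  simp only [PySem.List.foldl_append_singleton_eq_map, List.nil_append]
  rw [PySem.List.pyRange_one]
  simp only [add_sub_cancel_right, List.map_map]
  have hvals : (PySem.Dict.counter xs).values
      = (PySem.Set.ofList xs).map (fun k => (xs.count k : Int)) := by
    show (PySem.Dict.counter xs).items.map Prod.snd = _
    rw [PySem.Dict.items_counter, List.map_map]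
    rfl
  rw [hvals, wallForm, ← maxc_link xs h]
  apply List.map_congr_left
  intro k _
  simp only [Function.comp]
  have : ∀ (i : Int), (PySem.Dict.counter xs).keys.foldl
      (fun row p => if (PySem.Dict.counter xs).getD p 0 ≥ i then row ++ [p] else row) []
      = ((PySem.Dict.counter xs).keys.filter (fun p => decide (i ≤ (PySem.Dict.counter xs).getD p 0))) := by
    intro i
    rw [show (fun row p => if (PySem.Dict.counter xs).getD p 0 ≥ i then row ++ [p] else row)
        = (fun (row : List String) p => if (fun q => decide (i ≤ (PySem.Dict.counter xs).getD q 0)) p = true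
            then row ++ [(fun (q : String) => q) p] else row) from by
      funext row p; simp [ge_iff_le]]
    rw [PySem.List.foldl_append_if]
    simp
  rw [this]
  rw [PySem.Dict.keys_counter]
  apply List.filter_congr
  intro p _
  simp only [PySem.Dict.getD_counter, decide_eq_decide]
  omega

lemma B_eq_wallForm (xs : List String) :
    organize_exhibition_alt xs = wallForm xs := by
  unfold organize_exhibition_alt
  rw [PySem.Dict.foldl_insert_getD_add_one_eq_counter, B_loop_eq_rowsOf, PySem.Dict.items_counter]
  unfold rowsOf wallForm maxcN
  rw [List.foldl_map]
  apply List.map_congr_left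
  intro j _
  rw [List.filter_map, List.map_map]
  simp [Function.comp_def, Nat.cast_lt]

-- ===== VERDICT (by name: the statement is the Claim_ definition above) =====
theorem organize_exhibition_spec : Claim_equal_organize_exhibition := by
  intro xs _ hpre
  show organize_exhibition xs = organize_exhibition_alt xs
  rw [A_eq_wallForm xs hpre, B_eq_wallForm xs]
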